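-- pv_equiv track=rewrite | github.com/balantajd96/ADA_2019-2 | EXAM2/12321-Gas Stations/gas.py | mic_wf
-- ===== SOURCE A (Python) =====
-- def mic_wf(L,H,a):
--   """
--   Codigo de ADA-2019-1
--   Minimal Covering Algorithm with failure checking
--   """
--   a.sort()
--   ans,low,n,ok,N = list(),L,0,True,len(a)
--   cnt=len(a)
--   while ok and low<H and n!=N:
--     ok = a[n][0]<=low
--     best,n = n,n+1
--     while ok and n!=N and a[n][0]<=low:
--       if a[n][1]>a[best][1]:
--         best = n
--       n += 1
--     ans.append(best)
--     cnt-=1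
--     low = a[best][1]
--   ok = ok and low>=H
--   if ok==False:
--     ans = list()
--   if ans==[]:cnt=-1
--   return cnt
-- ===== SOURCE B (Python) =====
-- def mic_wf(L, H, a):
--     # Single flat pass over the sorted intervals with a pending-block 'reach'
--     # accumulator, instead of nested whiles tracking a best index.
--     a.sort()
--     low, rounds, reach = L, 0, None
--     for s, e in a:
--         if low >= H:
--             break
--         if s > low:
--             if reach is None:
--                 return -1          # gap: nothing reachable covers s
--             low, rounds, reach = reach, rounds + 1, None
--             if low >= H:
--                 break
--             if s > low:
--                 return -1
--         reach = e if reach is None else max(reach, e)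
--     if low < H and reach is not None:
--         low, rounds = reach, rounds + 1
--     if rounds == 0 or low < H:
--         return -1
--     return len(a) - rounds
-- ===== Notes on version B (the rewrite author's own statement) =====
-- stated objective: simpler
-- what changed: A's nested outer/inner whiles over indices (tracking a best index, an ok flag, an appended ans list and a decremented counter) are replaced by one flat for-loop over the sorted intervals that keeps only low, a round counter and a pending-block max-end accumulator, with a trailing commit after the loop.
import Mathlib
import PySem

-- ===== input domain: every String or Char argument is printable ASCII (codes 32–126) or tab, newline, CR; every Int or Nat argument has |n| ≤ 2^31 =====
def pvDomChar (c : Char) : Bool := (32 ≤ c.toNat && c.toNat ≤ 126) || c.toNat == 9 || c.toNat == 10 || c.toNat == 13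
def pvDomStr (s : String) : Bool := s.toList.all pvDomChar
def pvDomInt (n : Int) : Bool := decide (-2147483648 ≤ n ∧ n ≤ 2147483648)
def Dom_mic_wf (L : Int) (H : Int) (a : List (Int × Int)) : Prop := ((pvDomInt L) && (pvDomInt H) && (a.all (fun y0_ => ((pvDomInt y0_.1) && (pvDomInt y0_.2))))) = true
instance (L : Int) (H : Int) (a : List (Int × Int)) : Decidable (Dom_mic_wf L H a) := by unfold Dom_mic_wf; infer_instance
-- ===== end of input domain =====

-- B replaces A's nested outer/inner whiles (tracking a best index) by one flat pass over
-- the sorted list with a pending-block max-end accumulator; objective: simpler.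
-- Both A and B sort `a` in place in Python; the equivalence proved is about the return value.

-- ===== PORT A =====
-- inner while: `while ok and n!=N and a[n][0]<=low : if a[n][1]>a[best][1]: best=n ; n+=1`
-- (ok is constant inside the inner loop; the caller only enters it with ok=True).
-- a[n] is ported as getD n (0,0): every index read is in range (n < N, best < N).
def micAInner (s : List (Int × Int)) (low : Int) (best : Nat) (n : Nat) : Nat × Nat :=
  if h : n < s.length ∧ (s.getD n (0, 0)).1 ≤ low then
    micAInner s low (if (s.getD best (0, 0)).2 < (s.getD n (0, 0)).2 then n else best) (n + 1)
  else (best, n)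
termination_by s.length - n
decreasing_by omega

theorem micAInner_ge (s : List (Int × Int)) (low : Int) :
    ∀ best n, n ≤ (micAInner s low best n).2 := by
  intro best n
  fun_induction micAInner s low best n with
  | case1 best n h ih => simp only [dite_eq_ite] at *; omega
  | case2 best n h => simp

-- outer while; state = (ans, low, n, ok, cnt); `n != N` is ported as n < N (n ≤ N always holds).
def micAOuter (s : List (Int × Int)) (H : Int) (ans : List Nat) (low : Int) (n : Nat)
    (ok : Bool) (cnt : Int) : List Nat × Int × Bool × Int :=
  if h : ok = true ∧ low < H ∧ n < s.length then
    let okn : Bool := decide ((s.getD n (0, 0)).1 ≤ low)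
    let bn : Nat × Nat := if okn then micAInner s low n (n + 1) else (n, n + 1)
    micAOuter s H (ans ++ [bn.1]) (s.getD bn.1 (0, 0)).2 bn.2 okn (cnt - 1)
  else (ans, low, ok, cnt)
termination_by s.length - n
decreasing_by
  simp only [okn, dite_eq_ite]
  split
  · have := micAInner_ge s low n (n + 1); omega
  · simp; omega

def mic_wf (L : Int) (H : Int) (a : List (Int × Int)) : Int :=
  let s := PySem.List.sorted2 a (fun p => p.1) (fun p => p.2)   -- a.sort()
  let r := micAOuter s H [] L 0 true (Int.ofNat a.length)
  let ok2 : Bool := r.2.2.1 && decide (H ≤ r.2.1)               -- ok = ok and low>=H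
  let ans2 : List Nat := if ok2 = false then [] else r.1        -- if ok==False: ans=list()
  if ans2 = [] then -1 else r.2.2.2                             -- if ans==[]: cnt=-1

-- ===== PORT B =====
-- the for-loop of Source B: state (low, rounds, reach); `none` = the `return -1` exits,
-- `some st` = loop finished or broke with state st.
def micBGo (H : Int) : List (Int × Int) → Int → Int → Option Int → Option (Int × Int × Option Int)
  | [], low, rounds, reach => some (low, rounds, reach)
  | (st, e) :: rest, low, rounds, reach =>
    if H ≤ low then some (low, rounds, reach)                    -- break
    else if low < st then
      match reach with
      | none => none                                             -- return -1
      | some r =>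
        if H ≤ r then some (r, rounds + 1, none)                 -- commit then break
        else if r < st then none                                 -- return -1
        else micBGo H rest r (rounds + 1) (some e)               -- commit, start new block
    else
      micBGo H rest low rounds (some (match reach with | none => e | some r => max r e))

def mic_wf_alt (L : Int) (H : Int) (a : List (Int × Int)) : Int :=
  let s := PySem.List.sorted2 a (fun p => p.1) (fun p => p.2)   -- a.sort()
  match micBGo H s L 0 none with
  | none => -1
  | some (low, rounds, reach) =>
    let lr : Int × Int :=                                        -- trailing commit
      match reach with
      | some r => if low < H then (r, rounds + 1) else (low, rounds)
      | none => (low, rounds)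
    if lr.2 = 0 ∨ lr.1 < H then -1 else Int.ofNat a.length - lr.2

-- ===== PRECONDITION & SPEC =====
def Spec_mic_wf (L : Int) (H : Int) (a : List (Int × Int)) (out : Int) : Prop := out = mic_wf_alt L H a
instance (L : Int) (H : Int) (a : List (Int × Int)) (out : Int) : Decidable (Spec_mic_wf L H a out) := by unfold Spec_mic_wf; infer_instance

-- ===== CLAIM (what is proved, stated in full; the proofs are below) =====
def Claim_equal_mic_wf : Prop := ∀ (L : Int) (H : Int) (a : List (Int × Int)), Dom_mic_wf L H a → Spec_mic_wf L H a (mic_wf L H a)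

-- ===== LEMMAS AND PROOFS =====

-- Abstract greedy both loops compute: rounds of "swallow the maximal prefix block whose
-- starts are ≤ low, set low to the block's max end"; none = gap failure.
def gspec (H : Int) : List (Int × Int) → Int → Int → Option (Int × Int)
  | [], low, r => some (low, r)
  | (st, e) :: rest, low, r =>
    if H ≤ low then some (low, r)
    else if low < st then none
    else gspec H (rest.dropWhile (fun p => decide (p.1 ≤ low)))
          ((rest.takeWhile (fun p => decide (p.1 ≤ low))).foldl (fun m p => max m p.2) e) (r + 1)
termination_by t => t.length
decreasing_by
  have := List.length_dropWhile_le (fun p => decide (p.1 ≤ low)) rest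
  simp; omega

def resultOf (H N : Int) : Option (Int × Int) → Int
  | none => -1
  | some (low, r) => if r = 0 ∨ low < H then -1 else N - r

def bfinal (H N : Int) : Option (Int × Int × Option Int) → Int
  | none => -1
  | some (low, rounds, reach) =>
    let lr : Int × Int :=
      match reach with
      | some r => if low < H then (r, rounds + 1) else (low, rounds)
      | none => (low, rounds)
    if lr.2 = 0 ∨ lr.1 < H then -1 else N - lr.2

theorem drop_len_takeWhile {α : Type} (p : α → Bool) :
    ∀ l : List α, l.drop (l.takeWhile p).length = l.dropWhile p := by
  intro l
  induction l with
  | nil => simp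
  | cons x xs ih => by_cases h : p x <;> simp [h, ih]

theorem bgo_mid (H N : Int) : ∀ (t : List (Int × Int)) (low r m : Int), low < H →
    bfinal H N (micBGo H t low r (some m)) =
    resultOf H N (gspec H (t.dropWhile (fun p => decide (p.1 ≤ low)))
      ((t.takeWhile (fun p => decide (p.1 ≤ low))).foldl (fun acc p => max acc p.2) m) (r + 1)) := by
  intro t
  induction t with
  | nil =>
    intro low r m h
    by_cases hm : H ≤ m <;> simp [micBGo, bfinal, gspec, resultOf, h]
  | cons hd rest ih =>
    intro low r m h
    obtain ⟨st, e⟩ := hd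
    by_cases hst : st ≤ low
    · -- still inside the block
      rw [show micBGo H ((st, e) :: rest) low r (some m)
            = micBGo H rest low r (some (max m e)) by
          simp [micBGo, not_le.mpr h, not_lt.mpr hst]]
      rw [ih low r (max m e) h]
      simp [hst]
    · -- the block ends here: commit
      have hlt : low < st := not_le.mp hst
      have htw : ((st, e) :: rest).takeWhile (fun p => decide (p.1 ≤ low)) = [] := by
        simp [hst]
      have hdw : ((st, e) :: rest).dropWhile (fun p => decide (p.1 ≤ low)) = (st, e) :: rest := by
        simp [hst]
      rw [htw, hdw]
      simp only [List.foldl_nil]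
      by_cases hHm : H ≤ m
      · rw [show micBGo H ((st, e) :: rest) low r (some m) = some (m, r + 1, none) by
            simp [micBGo, not_le.mpr h, hlt, hHm]]
        simp [bfinal, gspec, resultOf, hHm]
      · by_cases hms : m < st
        · rw [show micBGo H ((st, e) :: rest) low r (some m) = none by
              simp [micBGo, not_le.mpr h, hlt, hHm, hms]]
          simp [bfinal, gspec, resultOf, hHm, hms]
        · rw [show micBGo H ((st, e) :: rest) low r (some m)
                = micBGo H rest m (r + 1) (some e) by
              simp [micBGo, not_le.mpr h, hlt, hHm, hms]]
          rw [ih m (r + 1) e (not_le.mp hHm)]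
          rw [show gspec H ((st, e) :: rest) m (r + 1)
                = gspec H (rest.dropWhile (fun p => decide (p.1 ≤ m)))
                    ((rest.takeWhile (fun p => decide (p.1 ≤ m))).foldl (fun acc p => max acc p.2) e)
                    (r + 1 + 1) by
              rw [gspec]; simp [hHm, hms]]

theorem bgo_none (H N : Int) : ∀ (t : List (Int × Int)) (low r : Int),
    bfinal H N (micBGo H t low r none) = resultOf H N (gspec H t low r) := by
  intro t low r
  cases t with
  | nil => simp [micBGo, bfinal, gspec, resultOf]
  | cons hd rest =>
    obtain ⟨st, e⟩ := hd
    by_cases hH : H ≤ low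
    · rw [show micBGo H ((st, e) :: rest) low r none = some (low, r, none) by
          simp [micBGo, hH]]
      simp [bfinal, gspec, resultOf, hH]
    · by_cases hst : low < st
      · rw [show micBGo H ((st, e) :: rest) low r none = none by
            simp [micBGo, hH, hst]]
        simp [bfinal, gspec, resultOf, hH, hst]
      · rw [show micBGo H ((st, e) :: rest) low r none = micBGo H rest low r (some e) by
            simp [micBGo, hH, hst]]
        rw [bgo_mid H N rest low r e (not_le.mp hH)]
        rw [show gspec H ((st, e) :: rest) low r
              = gspec H (rest.dropWhile (fun p => decide (p.1 ≤ low)))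
                  ((rest.takeWhile (fun p => decide (p.1 ≤ low))).foldl (fun acc p => max acc p.2) e)
                  (r + 1) by
            rw [gspec]; simp [hH, hst]]

theorem micAInner_eq (s : List (Int × Int)) (low : Int) (best n : Nat) :
    micAInner s low best n =
      if n < s.length ∧ (s.getD n (0, 0)).1 ≤ low then
        micAInner s low (if (s.getD best (0, 0)).2 < (s.getD n (0, 0)).2 then n else best) (n + 1)
      else (best, n) := by
  conv_lhs => rw [micAInner]
  rw [dite_eq_ite]

theorem micAOuter_eq (s : List (Int × Int)) (H : Int) (ans : List Nat) (low : Int) (n : Nat)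
    (ok : Bool) (cnt : Int) :
    micAOuter s H ans low n ok cnt =
      if ok = true ∧ low < H ∧ n < s.length then
        let okn : Bool := decide ((s.getD n (0, 0)).1 ≤ low)
        let bn : Nat × Nat := if okn then micAInner s low n (n + 1) else (n, n + 1)
        micAOuter s H (ans ++ [bn.1]) (s.getD bn.1 (0, 0)).2 bn.2 okn (cnt - 1)
      else (ans, low, ok, cnt) := by
  conv_lhs => rw [micAOuter]
  rw [dite_eq_ite]

theorem inner_char (s : List (Int × Int)) (low : Int) : ∀ (k best n : Nat), s.length - n ≤ k →
    ∃ b', micAInner s low best n =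
        (b', n + ((s.drop n).takeWhile (fun p => decide (p.1 ≤ low))).length) ∧
      (s.getD b' (0, 0)).2 =
        ((s.drop n).takeWhile (fun p => decide (p.1 ≤ low))).foldl
          (fun m p => max m p.2) ((s.getD best (0, 0)).2) := by
  intro k
  induction k with
  | zero =>
    intro best n hk
    have hd : s.drop n = [] := List.drop_eq_nil_of_le (by omega)
    rw [micAInner_eq, if_neg (by omega)]
    exact ⟨best, by simp [hd], by simp [hd]⟩
  | succ k ih =>
    intro best n hk
    by_cases hn : n < s.length
    · have hsn : s.getD n (0, 0) = s[n] := List.getD_eq_getElem s (0, 0) hn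
      by_cases hle : (s.getD n (0, 0)).1 ≤ low
      · have hle' : decide (s[n].1 ≤ low) = true := by rw [← hsn]; simpa using hle
        have htw : (s.drop n).takeWhile (fun p => decide (p.1 ≤ low))
            = s[n] :: (s.drop (n + 1)).takeWhile (fun p => decide (p.1 ≤ low)) := by
          rw [List.drop_eq_getElem_cons hn, List.takeWhile_cons, hle']
          simp
        obtain ⟨b', hEq, hVal⟩ :=
          ih (if (s.getD best (0, 0)).2 < (s.getD n (0, 0)).2 then n else best) (n + 1) (by omega)
        rw [micAInner_eq, if_pos ⟨hn, hle⟩, hEq]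
        refine ⟨b', ?_, ?_⟩
        · rw [htw]
          refine Prod.ext rfl ?_
          simp only [List.length_cons]
          omega
        · rw [htw, List.foldl_cons, hVal]
          congr 1
          rw [← hsn]
          split_ifs with hc
          · exact (max_eq_right (le_of_lt hc)).symm
          · exact (max_eq_left (not_lt.mp hc)).symm
      · have hle' : decide (s[n].1 ≤ low) = false := by rw [← hsn]; simpa using hle
        have htw : (s.drop n).takeWhile (fun p => decide (p.1 ≤ low)) = [] := by
          rw [List.drop_eq_getElem_cons hn]
          simp [List.takeWhile_cons, hle']
        rw [micAInner_eq, if_neg (by tauto)]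
        exact ⟨best, by simp [htw], by simp [htw]⟩
    · have hd : s.drop n = [] := List.drop_eq_nil_of_le (by omega)
      rw [micAInner_eq, if_neg (by omega)]
      exact ⟨best, by simp [hd], by simp [hd]⟩

theorem outer_char (s : List (Int × Int)) (H : Int) :
    ∀ (k n : Nat), s.length - n ≤ k → n ≤ s.length → ∀ (low : Int) (ans : List Nat) (cnt r : Int),
    (match gspec H (s.drop n) low r with
     | none => (micAOuter s H ans low n true cnt).2.2.1 = false
     | some (low', r') => ∃ Lb : List Nat,
         micAOuter s H ans low n true cnt = (ans ++ Lb, low', true, cnt - (r' - r)) ∧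
         (Lb.length : Int) = r' - r) := by
  intro k
  induction k with
  | zero =>
    intro n hk hn' low ans cnt r
    have hd : s.drop n = [] := List.drop_eq_nil_of_le (by omega)
    rw [hd]
    rw [show gspec H [] low r = some (low, r) from by rw [gspec]]
    rw [micAOuter_eq, if_neg (by omega)]
    exact ⟨[], by simp, by simp⟩
  | succ k ih =>
    intro n hk hn' low ans cnt r
    by_cases hn : n < s.length
    · have hsn : s.getD n (0, 0) = s[n] := List.getD_eq_getElem s (0, 0) hn
      rcases hp : s[n] with ⟨st, e⟩
      have hget : s.getD n (0, 0) = (st, e) := by rw [hsn, hp]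
      rw [List.drop_eq_getElem_cons hn, hp]
      by_cases hH : H ≤ low
      · rw [show gspec H ((st, e) :: s.drop (n + 1)) low r = some (low, r) from by
            rw [gspec]; simp [hH]]
        rw [micAOuter_eq, if_neg (by intro hc; exact absurd hc.2.1 (not_lt.mpr hH))]
        exact ⟨[], by simp, by simp⟩
      · by_cases hle : st ≤ low
        · -- a full round: swallow the block starting at n
          have hokn : decide ((s.getD n (0, 0)).1 ≤ low) = true := by rw [hget]; simpa using hle
          obtain ⟨b', hEq, hVal⟩ := inner_char s low s.length n (n + 1) (by omega)
          have htwlen : ((s.drop (n + 1)).takeWhile (fun p => decide (p.1 ≤ low))).length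
              ≤ s.length - (n + 1) := by
            have h1 : ((s.drop (n + 1)).takeWhile (fun p => decide (p.1 ≤ low))).length
                ≤ (s.drop (n + 1)).length := (List.takeWhile_sublist _).length_le
            simpa using h1
          set tw := (s.drop (n + 1)).takeWhile (fun p => decide (p.1 ≤ low)) with htw
          set n' := n + 1 + tw.length with hn'def
          have hdrop : s.drop n' = (s.drop (n + 1)).dropWhile (fun p => decide (p.1 ≤ low)) := by
            rw [hn'def, ← List.drop_drop, htw, drop_len_takeWhile]
          have hlow1 : (s.getD b' (0, 0)).2 = tw.foldl (fun m p => max m p.2) e := by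
            rw [hVal, hget]
          rw [micAOuter_eq, if_pos ⟨rfl, not_le.mp hH, hn⟩]
          simp only [hokn, if_true, hEq]
          rw [show gspec H ((st, e) :: s.drop (n + 1)) low r
                = gspec H ((s.drop (n + 1)).dropWhile (fun p => decide (p.1 ≤ low)))
                    (tw.foldl (fun m p => max m p.2) e) (r + 1) from by
              rw [gspec]; simp [hH, not_lt.mpr hle, htw]]
          rw [← hlow1]
          have hrec := ih n' (by omega) (by omega) (s.getD b' (0, 0)).2 (ans ++ [b']) (cnt - 1) (r + 1)
          rw [hdrop] at hrec
          rcases hg : gspec H ((s.drop (n + 1)).dropWhile (fun p => decide (p.1 ≤ low)))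
              (s.getD b' (0, 0)).2 (r + 1) with _ | ⟨low2, r2⟩
          · rw [hg] at hrec
            exact hrec
          · rw [hg] at hrec
            obtain ⟨Lb, hEq2, hLen2⟩ := hrec
            refine ⟨b' :: Lb, ?_, ?_⟩
            · rw [hEq2]
              refine Prod.ext ?_ (Prod.ext rfl (Prod.ext rfl ?_)) <;> simp <;> omega
            · simp only [List.length_cons]
              push_cast
              omega
        · -- gap: a[n][0] > low, ok becomes False
          have hokn : decide ((s.getD n (0, 0)).1 ≤ low) = false := by rw [hget]; simpa using hle
          rw [show gspec H ((st, e) :: s.drop (n + 1)) low r = none from by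
              rw [gspec]; simp [hH, not_le.mp hle]]
          rw [micAOuter_eq, if_pos ⟨rfl, not_le.mp hH, hn⟩]
          simp only [hokn, if_false, Bool.false_eq_true]
          rw [micAOuter_eq, if_neg (by simp)]
    · have hd : s.drop n = [] := List.drop_eq_nil_of_le (by omega)
      rw [hd]
      rw [show gspec H [] low r = some (low, r) from by rw [gspec]]
      rw [micAOuter_eq, if_neg (by omega)]
      exact ⟨[], by simp, by simp⟩

-- ===== VERDICT (by name: the statement is the Claim_ definition above) =====
theorem mic_wf_spec : Claim_equal_mic_wf := by
  unfold Claim_equal_mic_wf Spec_mic_wf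
  intro L H a _
  have halt : mic_wf_alt L H a
      = bfinal H ((a.length : Int))
          (micBGo H (PySem.List.sorted2 a (fun p => p.1) (fun p => p.2)) L 0 none) := rfl
  rw [halt, bgo_none]
  set s := PySem.List.sorted2 a (fun p => p.1) (fun p => p.2) with hs
  have hA : mic_wf L H a =
      (if (if ((micAOuter s H [] L 0 true ((a.length : Int))).2.2.1
              && decide (H ≤ (micAOuter s H [] L 0 true ((a.length : Int))).2.1)) = false
            then ([] : List Nat) else (micAOuter s H [] L 0 true ((a.length : Int))).1) = []
        then -1 else (micAOuter s H [] L 0 true ((a.length : Int))).2.2.2) := rfl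
  rw [hA]
  have hchar := outer_char s H s.length 0 (by omega) (by omega) L [] ((a.length : Int)) 0
  rw [List.drop_zero] at hchar
  rcases hg : gspec H s L 0 with _ | ⟨low', r'⟩
  · rw [hg] at hchar
    have hok : (micAOuter s H [] L 0 true ((a.length : Int))).2.2.1 = false := hchar
    simp [resultOf]
    intro h1 _ _
    rw [hok] at h1
    cases h1
  · rw [hg] at hchar
    obtain ⟨Lb, hEq, hLen⟩ := hchar
    simp only [List.nil_append] at hEq
    rw [hEq]
    simp only [sub_zero] at hLen ⊢
    by_cases hH' : H ≤ low'
    · by_cases hLb : Lb = []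
      · have hr : r' = 0 := by rw [hLb] at hLen; simpa using hLen.symm
        simp [hLb, hr, resultOf]
      · have hr : r' ≠ 0 := by
          intro hc; rw [hc] at hLen
          exact hLb (List.length_eq_zero_iff.mp (by exact_mod_cast hLen))
        simp [hLb, hr, hH', resultOf]
    · simp [hH', not_le.mp hH', resultOf]
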